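-- pv_equiv track=rewrite | github.com/josalhor/hermax | tests/model/test_int_bool_sum_counter_fastpath.py | _bruteforce_sat_op
-- ===== SOURCE A (Python) =====
-- import itertools
--
-- def _bruteforce_sat_op(lb: int, ub: int, n_lits: int, op: str, offset_x: int = 0, offset_s: int = 0) -> bool:
--     dom = range(lb, ub)
--     for xv in dom:
--         for bits in itertools.product([0, 1], repeat=n_lits):
--             a = xv + offset_x
--             b = sum(bits) + offset_s
--             ok = (
--                 (a == b) if op == "==" else
--                 (a <= b) if op == "<=" else
--                 (a >= b) if op == ">=" else
--                 (a < b) if op == "<" else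
--                 (a > b)
--             )
--             if ok:
--                 return True
--     return False
-- ===== SOURCE B (Python) =====
-- def _bruteforce_sat_op(lb: int, ub: int, n_lits: int, op: str, offset_x: int = 0, offset_s: int = 0) -> bool:
--     # a = xv + offset_x ranges over [lb+offset_x, ub-1+offset_x] (if lb < ub);
--     # b = sum(bits) + offset_s ranges over [offset_s, n_lits+offset_s] (if n_lits >= 0).
--     # The existential comparison is decided from the interval endpoints directly.
--     if lb >= ub or n_lits < 0:
--         return False
--     a_min = lb + offset_x
--     a_max = ub - 1 + offset_x
--     b_min = offset_s
--     b_max = n_lits + offset_s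
--     if op == "==":
--         return a_min <= b_max and b_min <= a_max
--     if op == "<=":
--         return a_min <= b_max
--     if op == ">=":
--         return a_max >= b_min
--     if op == "<":
--         return a_min < b_max
--     return a_max > b_min
-- ===== Notes on version B (the rewrite author's own statement) =====
-- stated objective: simpler
-- what changed: Replaces the brute-force scan over all xv in range(lb,ub) and all 2^n_lits bit tuples by a closed-form comparison of the endpoints of the two value intervals [lb+offset_x, ub-1+offset_x] and [offset_s, n_lits+offset_s].
import Mathlib
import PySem

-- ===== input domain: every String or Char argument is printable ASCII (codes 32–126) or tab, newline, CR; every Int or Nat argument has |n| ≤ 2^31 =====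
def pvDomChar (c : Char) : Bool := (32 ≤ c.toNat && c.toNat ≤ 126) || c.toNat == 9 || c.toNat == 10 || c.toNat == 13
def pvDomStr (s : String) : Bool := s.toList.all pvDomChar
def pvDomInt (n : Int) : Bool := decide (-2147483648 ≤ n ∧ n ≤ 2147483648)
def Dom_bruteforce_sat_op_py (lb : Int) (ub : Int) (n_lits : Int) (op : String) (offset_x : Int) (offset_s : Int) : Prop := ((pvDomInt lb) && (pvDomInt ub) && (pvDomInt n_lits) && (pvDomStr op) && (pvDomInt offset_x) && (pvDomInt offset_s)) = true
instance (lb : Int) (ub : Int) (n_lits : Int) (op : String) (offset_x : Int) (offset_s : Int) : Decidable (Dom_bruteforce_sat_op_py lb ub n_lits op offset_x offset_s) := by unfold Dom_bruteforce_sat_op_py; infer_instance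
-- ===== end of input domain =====

-- B replaces A's scan over all xv and all 2^n_lits bit tuples by a closed-form comparison
-- of the endpoints of the two attainable value intervals (objective: simpler).

-- ===== PORT A =====
-- itertools.product([0, 1], repeat=n), consumed lazily with early return:
-- pvAnyBits n p = "some 0/1 tuple of length n satisfies p", enumerated in product order,
-- stopping at the first hit exactly like A's 'return True'
def pvAnyBits : Nat → (List Int → Bool) → Bool
  | 0, p => p []
  | n + 1, p => ([0, 1] : List Int).any (fun b => pvAnyBits n (fun t => p (b :: t)))

def bruteforce_sat_op_py (lb : Int) (ub : Int) (n_lits : Int) (op : String) (offset_x : Int) (offset_s : Int) : Bool :=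
  -- for xv in range(lb, ub): for bits in product([0,1], repeat=n_lits): if ok: return True
  (PySem.List.pyRange lb ub 1).any (fun xv =>
    pvAnyBits n_lits.toNat (fun bits =>
      let a := xv + offset_x
      let b := bits.sum + offset_s
      if op == "==" then a == b
      else if op == "<=" then decide (a ≤ b)
      else if op == ">=" then decide (a ≥ b)
      else if op == "<" then decide (a < b)
      else decide (a > b)))

-- ===== PORT B =====
def bruteforce_sat_op_py_alt (lb : Int) (ub : Int) (n_lits : Int) (op : String) (offset_x : Int) (offset_s : Int) : Bool :=
  if lb ≥ ub ∨ n_lits < 0 then false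
  else
    let aMin := lb + offset_x
    let aMax := ub - 1 + offset_x
    let bMin := offset_s
    let bMax := n_lits + offset_s
    if op == "==" then decide (aMin ≤ bMax) && decide (bMin ≤ aMax)
    else if op == "<=" then decide (aMin ≤ bMax)
    else if op == ">=" then decide (aMax ≥ bMin)
    else if op == "<" then decide (aMin < bMax)
    else decide (aMax > bMin)

-- ===== PRECONDITION & SPEC =====
-- A raises ValueError (itertools.product with negative repeat) exactly when the outer
-- loop is entered (lb < ub) while n_lits < 0; those inputs are excluded.
def Pre_bruteforce_sat_op_py (lb : Int) (ub : Int) (n_lits : Int) (op : String) (offset_x : Int) (offset_s : Int) : Prop :=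
  lb ≥ ub ∨ 0 ≤ n_lits
instance (lb : Int) (ub : Int) (n_lits : Int) (op : String) (offset_x : Int) (offset_s : Int) : Decidable (Pre_bruteforce_sat_op_py lb ub n_lits op offset_x offset_s) := by unfold Pre_bruteforce_sat_op_py; infer_instance

def pvWitness_bruteforce_sat_op_py : Int × Int × Int × String × Int × Int := (0, 3, 2, "<=", 0, 0)

def Spec_bruteforce_sat_op_py (lb : Int) (ub : Int) (n_lits : Int) (op : String) (offset_x : Int) (offset_s : Int) (out : Bool) : Prop := out = bruteforce_sat_op_py_alt lb ub n_lits op offset_x offset_s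
instance (lb : Int) (ub : Int) (n_lits : Int) (op : String) (offset_x : Int) (offset_s : Int) (out : Bool) : Decidable (Spec_bruteforce_sat_op_py lb ub n_lits op offset_x offset_s out) := by unfold Spec_bruteforce_sat_op_py; infer_instance

-- ===== CLAIM (what is proved, stated in full; the proofs are below) =====
def Claim_equal_bruteforce_sat_op_py : Prop := ∀ (lb : Int) (ub : Int) (n_lits : Int) (op : String) (offset_x : Int) (offset_s : Int), Dom_bruteforce_sat_op_py lb ub n_lits op offset_x offset_s → Pre_bruteforce_sat_op_py lb ub n_lits op offset_x offset_s → Spec_bruteforce_sat_op_py lb ub n_lits op offset_x offset_s (bruteforce_sat_op_py lb ub n_lits op offset_x offset_s)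


-- ===== LEMMAS AND PROOFS =====

-- the list of all 0/1 tuples of length n, in product order (proof-side view of pvAnyBits)
def pvBitsLists : Nat → List (List Int)
  | 0 => [[]]
  | n + 1 => ([0, 1] : List Int).flatMap (fun b => (pvBitsLists n).map (fun t => b :: t))

-- the short-circuiting enumerator of the port equals any over the full tuple list
lemma pvAnyBits_eq (n : Nat) (p : List Int → Bool) : pvAnyBits n p = (pvBitsLists n).any p := by
  induction n generalizing p with
  | zero => simp [pvAnyBits, pvBitsLists]
  | succ n ih =>
    simp only [pvAnyBits, pvBitsLists, ih, List.any_flatMap, List.any_map, Function.comp_def]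

-- every bit list of pvBitsLists n sums to some s with 0 ≤ s ≤ n
lemma pvBits_sum_bound (n : Nat) : ∀ bits ∈ pvBitsLists n, 0 ≤ bits.sum ∧ bits.sum ≤ (n : Int) := by
  induction n with
  | zero => intro bits h; simp [pvBitsLists] at h; subst h; simp
  | succ n ih =>
    intro bits h
    simp only [pvBitsLists, List.mem_flatMap, List.mem_map] at h
    obtain ⟨b, hb, t, ht, rfl⟩ := h
    obtain ⟨h0, h1⟩ := ih t ht
    simp only [List.mem_cons, List.not_mem_nil, or_false] at hb
    rcases hb with rfl | rfl <;> · simp only [List.sum_cons]; push_cast; omega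

-- every s with 0 ≤ s ≤ n is the sum of some bit list of pvBitsLists n
lemma pvBits_sum_exists (n : Nat) : ∀ s : Int, 0 ≤ s → s ≤ (n : Int) → ∃ bits ∈ pvBitsLists n, bits.sum = s := by
  induction n with
  | zero =>
    intro s h0 h1
    refine ⟨[], by simp [pvBitsLists], ?_⟩
    simp only [List.sum_nil]
    omega
  | succ n ih =>
    intro s h0 h1
    by_cases hs : s ≤ (n : Int)
    · obtain ⟨t, ht, hsum⟩ := ih s h0 hs
      refine ⟨(0 : Int) :: t, ?_, by simp [hsum]⟩
      simp only [pvBitsLists, List.mem_flatMap, List.mem_map]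
      exact ⟨0, by simp, t, ht, rfl⟩
    · obtain ⟨t, ht, hsum⟩ := ih (s - 1) (by push_cast at h1 ⊢; omega) (by push_cast at h1 ⊢; omega)
      refine ⟨(1 : Int) :: t, ?_, by rw [List.sum_cons, hsum]; omega⟩
      simp only [pvBitsLists, List.mem_flatMap, List.mem_map]
      exact ⟨1, by simp, t, ht, rfl⟩

-- ===== VERDICT (by name: the statement is the Claim_ definition above) =====
theorem bruteforce_sat_op_py_spec : Claim_equal_bruteforce_sat_op_py := by
  intro lb ub n_lits op offset_x offset_s _ hpre
  unfold Spec_bruteforce_sat_op_py bruteforce_sat_op_py bruteforce_sat_op_py_alt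
  simp only [pvAnyBits_eq]
  by_cases hub : lb ≥ ub
  · rw [if_pos (Or.inl hub)]
    simp [PySem.List.pyRange_one, show (ub - lb).toNat = 0 by omega]
  · have hlt : lb < ub := by omega
    have hn : 0 ≤ n_lits := by rcases hpre with h | h <;> omega
    have hnn : ((n_lits.toNat : Nat) : Int) = n_lits := Int.toNat_of_nonneg hn
    rw [if_neg (by omega)]
    by_cases h1 : op = "=="
    · subst h1
      rw [Bool.eq_iff_iff]
      simp only [List.any_eq_true, PySem.List.mem_pyRange_one, beq_iff_eq, Bool.and_eq_true,
        decide_eq_true_eq, String.reduceBEq, if_true]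
      constructor
      · rintro ⟨xv, ⟨a1, a2⟩, bits, hb, he⟩
        obtain ⟨s0, s1⟩ := pvBits_sum_bound n_lits.toNat bits hb
        omega
      · rintro ⟨c1, c2⟩
        obtain ⟨bits, hb, hsum⟩ := pvBits_sum_exists n_lits.toNat
          (max lb (offset_s - offset_x) + offset_x - offset_s) (by omega) (by omega)
        exact ⟨max lb (offset_s - offset_x), ⟨by omega, by omega⟩, bits, hb, by omega⟩
    · by_cases h2 : op = "<="
      · subst h2
        rw [Bool.eq_iff_iff]
        simp only [List.any_eq_true, PySem.List.mem_pyRange_one, decide_eq_true_eq,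
          String.reduceBEq, if_true, Bool.false_eq_true, if_false]
        constructor
        · rintro ⟨xv, ⟨a1, a2⟩, bits, hb, he⟩
          obtain ⟨s0, s1⟩ := pvBits_sum_bound n_lits.toNat bits hb
          omega
        · intro hc
          obtain ⟨bits, hb, hsum⟩ := pvBits_sum_exists n_lits.toNat (n_lits.toNat : Int)
            (by omega) (le_refl _)
          exact ⟨lb, ⟨le_refl _, hlt⟩, bits, hb, by omega⟩
      · by_cases h3 : op = ">="
        · subst h3
          rw [Bool.eq_iff_iff]
          simp only [List.any_eq_true, PySem.List.mem_pyRange_one, decide_eq_true_eq, ge_iff_le,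
            String.reduceBEq, if_true, Bool.false_eq_true, if_false]
          constructor
          · rintro ⟨xv, ⟨a1, a2⟩, bits, hb, he⟩
            obtain ⟨s0, s1⟩ := pvBits_sum_bound n_lits.toNat bits hb
            omega
          · intro hc
            obtain ⟨bits, hb, hsum⟩ := pvBits_sum_exists n_lits.toNat 0 (le_refl _) (by omega)
            exact ⟨ub - 1, ⟨by omega, by omega⟩, bits, hb, by omega⟩
        · by_cases h4 : op = "<"
          · subst h4
            rw [Bool.eq_iff_iff]
            simp only [List.any_eq_true, PySem.List.mem_pyRange_one, decide_eq_true_eq,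
              String.reduceBEq, if_true, Bool.false_eq_true, if_false]
            constructor
            · rintro ⟨xv, ⟨a1, a2⟩, bits, hb, he⟩
              obtain ⟨s0, s1⟩ := pvBits_sum_bound n_lits.toNat bits hb
              omega
            · intro hc
              obtain ⟨bits, hb, hsum⟩ := pvBits_sum_exists n_lits.toNat (n_lits.toNat : Int)
                (by omega) (le_refl _)
              exact ⟨lb, ⟨le_refl _, hlt⟩, bits, hb, by omega⟩
          · have e1 : (op == "==") = false := beq_eq_false_iff_ne.mpr h1
            have e2 : (op == "<=") = false := beq_eq_false_iff_ne.mpr h2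
            have e3 : (op == ">=") = false := beq_eq_false_iff_ne.mpr h3
            have e4 : (op == "<") = false := beq_eq_false_iff_ne.mpr h4
            rw [Bool.eq_iff_iff]
            simp only [List.any_eq_true, PySem.List.mem_pyRange_one, decide_eq_true_eq, gt_iff_lt,
              e1, e2, e3, e4, Bool.false_eq_true, if_false]
            constructor
            · rintro ⟨xv, ⟨a1, a2⟩, bits, hb, he⟩
              obtain ⟨s0, s1⟩ := pvBits_sum_bound n_lits.toNat bits hb
              omega
            · intro hc
              obtain ⟨bits, hb, hsum⟩ := pvBits_sum_exists n_lits.toNat 0 (le_refl _) (by omega)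
              exact ⟨ub - 1, ⟨by omega, by omega⟩, bits, hb, by omega⟩
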